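-- pv_equiv track=rewrite | github.com/stshunz/3sxtra | tools/fightcade_replays/replay_inputs.py | find_round_boundaries
-- ===== SOURCE A (Python) =====
-- def find_round_boundaries(frames):
--     """Find all is_in_match 0->1 transition indices."""
--     starts = []
--     prev = 0
--     for i, row in enumerate(frames):
--         cur = int(row.get("is_in_match", 0))
--         if cur == 1 and prev == 0:
--             starts.append(i)
--         prev = cur
--     return starts
-- ===== SOURCE B (Python) =====
-- def find_round_boundaries(frames):
--     """Find all is_in_match 0->1 transition indices (run-length decomposition)."""
--     flags = [int(row.get("is_in_match", 0)) for row in frames]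
--     # run-length encode the flag sequence
--     runs = []
--     for v in flags:
--         if runs and runs[-1][0] == v:
--             runs[-1][1] += 1
--         else:
--             runs.append([v, 1])
--     # a run of 1s starts a round iff the previous run's value was 0 (or it is the first run)
--     starts = []
--     pos = 0
--     prev = 0
--     for v, n in runs:
--         if v == 1 and prev == 0:
--             starts.append(pos)
--         pos += n
--         prev = v
--     return starts
-- ===== Notes on version B (the rewrite author's own statement) =====
-- stated objective: alternative
-- what changed: Replaces A's stateful prev-tracking per-element loop with a run-length-encoding pass over the flag list followed by a scan over the runs that emits the start position of each maximal run of 1s preceded by a 0.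
import Mathlib
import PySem

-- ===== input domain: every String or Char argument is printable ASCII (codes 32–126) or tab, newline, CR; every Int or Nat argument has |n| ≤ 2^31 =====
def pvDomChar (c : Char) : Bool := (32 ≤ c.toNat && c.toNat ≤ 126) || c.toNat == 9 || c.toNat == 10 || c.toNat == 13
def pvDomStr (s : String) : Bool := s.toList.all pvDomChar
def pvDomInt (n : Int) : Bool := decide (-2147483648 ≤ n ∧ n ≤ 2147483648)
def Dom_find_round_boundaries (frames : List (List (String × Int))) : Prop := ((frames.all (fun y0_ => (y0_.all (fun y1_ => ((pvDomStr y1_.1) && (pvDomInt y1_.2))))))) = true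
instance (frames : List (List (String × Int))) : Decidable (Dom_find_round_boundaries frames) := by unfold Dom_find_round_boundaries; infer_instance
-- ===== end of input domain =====

-- B replaces A's stateful prev-tracking per-element loop by a run-length-encoding pass that emits
-- the start position of each maximal run of 1s preceded by a 0 (objective: alternative decomposition).


-- ===== PORT A =====
def find_round_boundaries (frames : List (List (String × Int))) : List Int :=
  ((PySem.List.enumerate frames 0).foldl
    (fun (st : List Int × Int) p =>
      let cur := PySem.Dict.getD (PySem.Dict.mk p.2) "is_in_match" 0
      ((if cur = 1 ∧ st.2 = 0 then st.1 ++ [p.1] else st.1), cur))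
    ([], 0)).1

-- ===== PORT B =====
-- run-length encoding of the flag list (runs kept reversed while building, as Source B mutates runs[-1])
def pvRLE (flags : List Int) : List (Int × Int) :=
  (flags.foldl
    (fun (runs : List (Int × Int)) v =>
      match runs with
      | (w, n) :: rest => if w = v then (w, n + 1) :: rest else (v, 1) :: (w, n) :: rest
      | [] => [(v, 1)])
    []).reverse

def find_round_boundaries_alt (frames : List (List (String × Int))) : List Int :=
  let flags := frames.map (fun row => PySem.Dict.getD (PySem.Dict.mk row) "is_in_match" 0)
  ((pvRLE flags).foldl
    (fun (st : List Int × Int × Int) r =>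
      ((if r.1 = 1 ∧ st.2.2 = 0 then st.1 ++ [st.2.1] else st.1), st.2.1 + r.2, r.1))
    ([], 0, 0)).1

-- ===== PRECONDITION & SPEC =====
def Spec_find_round_boundaries (frames : List (List (String × Int))) (out : List Int) : Prop := out = find_round_boundaries_alt frames
instance (frames : List (List (String × Int))) (out : List Int) : Decidable (Spec_find_round_boundaries frames out) := by unfold Spec_find_round_boundaries; infer_instance

-- ===== CLAIM (what is proved, stated in full; the proofs are below) =====
def Claim_equal_find_round_boundaries : Prop := ∀ (frames : List (List (String × Int))), Dom_find_round_boundaries frames → Spec_find_round_boundaries frames (find_round_boundaries frames)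

-- ===== LEMMAS AND PROOFS =====

-- reference recursion: starts emitted by the transition scan over the flag list, from index i, prev value
def pvGo (prev i : Int) : List Int → List Int
  | [] => []
  | v :: vs => (if v = 1 ∧ prev = 0 then [i] else []) ++ pvGo v (i + 1) vs

-- expansion of a run list back into the flag list
def pvExpand : List (Int × Int) → List Int
  | [] => []
  | (v, n) :: rs => List.replicate n.toNat v ++ pvExpand rs

-- ---- A side ----
theorem pvA_fold (l : List (List (String × Int))) :
    ∀ (acc : List Int) (prev i : Int),
    ((PySem.List.enumerate l i).foldl
      (fun (st : List Int × Int) p =>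
        let cur := PySem.Dict.getD (PySem.Dict.mk p.2) "is_in_match" 0
        ((if cur = 1 ∧ st.2 = 0 then st.1 ++ [p.1] else st.1), cur))
      (acc, prev)).1
    = acc ++ pvGo prev i (l.map (fun row => PySem.Dict.getD (PySem.Dict.mk row) "is_in_match" 0)) := by
  induction l with
  | nil => intro acc prev i; simp [PySem.List.enumerate_nil, pvGo]
  | cons row rest ih =>
    intro acc prev i
    rw [PySem.List.enumerate_cons]
    simp only [List.foldl_cons, List.map_cons, pvGo]
    rw [ih]
    split_ifs <;> simp

-- ---- B side ----
theorem pvGo_replicate (n : Nat) (hn : 0 < n) (v prev i : Int) (rest : List Int) :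
    pvGo prev i (List.replicate n v ++ rest)
    = (if v = 1 ∧ prev = 0 then [i] else []) ++ pvGo v (i + n) rest := by
  induction n generalizing prev i with
  | zero => omega
  | succ m ih =>
    simp only [List.replicate_succ, List.cons_append, pvGo]
    rcases Nat.eq_zero_or_pos m with hm | hm
    · subst hm; simp
    · rw [ih hm]
      have : (if v = 1 ∧ v = 0 then ([i + 1] : List Int) else []) = [] := by
        split_ifs with h
        · rcases h with ⟨h1, h2⟩; omega
        · rfl
      rw [this]
      simp only [List.nil_append]
      congr 2
      push_cast; ring

theorem pvB_fold (runs : List (Int × Int)) :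
    ∀ (acc : List Int) (pos prev : Int), (∀ r ∈ runs, 0 < r.2) →
    (runs.foldl
      (fun (st : List Int × Int × Int) r =>
        ((if r.1 = 1 ∧ st.2.2 = 0 then st.1 ++ [st.2.1] else st.1), st.2.1 + r.2, r.1))
      (acc, pos, prev)).1
    = acc ++ pvGo prev pos (pvExpand runs) := by
  induction runs with
  | nil => intro acc pos prev _; simp [pvExpand, pvGo]
  | cons r rs ih =>
    intro acc pos prev hpos
    obtain ⟨v, n⟩ := r
    have hn : 0 < n := hpos (v, n) (by simp)
    simp only [List.foldl_cons, pvExpand]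
    rw [ih _ _ _ (fun r hr => hpos r (List.mem_cons_of_mem _ hr))]
    rw [pvGo_replicate n.toNat (by omega) v prev pos (pvExpand rs)]
    have : ((n.toNat : Int)) = n := by omega
    rw [this]
    split_ifs <;> simp

theorem pvExpand_append (xs ys : List (Int × Int)) :
    pvExpand (xs ++ ys) = pvExpand xs ++ pvExpand ys := by
  induction xs with
  | nil => simp [pvExpand]
  | cons x xs ih => obtain ⟨v, n⟩ := x; simp [pvExpand, ih]

-- RLE correctness: the reversed accumulator expands to the consumed prefix, and all lengths are positive
theorem pvRLE_inv (flags : List Int) :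
    ∀ (acc : List (Int × Int)), (∀ r ∈ acc, 0 < r.2) →
    (pvExpand ((flags.foldl
        (fun (runs : List (Int × Int)) v =>
          match runs with
          | (w, n) :: rest => if w = v then (w, n + 1) :: rest else (v, 1) :: (w, n) :: rest
          | [] => [(v, 1)])
        acc).reverse)
      = pvExpand acc.reverse ++ flags)
    ∧ (∀ r ∈ (flags.foldl
        (fun (runs : List (Int × Int)) v =>
          match runs with
          | (w, n) :: rest => if w = v then (w, n + 1) :: rest else (v, 1) :: (w, n) :: rest
          | [] => [(v, 1)])
        acc), 0 < r.2) := by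
  induction flags with
  | nil => intro acc h; simp only [List.foldl_nil]; exact ⟨by simp, h⟩
  | cons v vs ih =>
    intro acc hacc
    simp only [List.foldl_cons]
    match acc, hacc with
    | [], _ =>
      have := ih [(v, 1)] (by simp)
      simpa [pvExpand] using this
    | (w, n) :: rest, hacc =>
      have hn : 0 < n := hacc (w, n) (by simp)
      have hrest : ∀ r ∈ rest, 0 < r.2 := fun r hr => hacc r (List.mem_cons_of_mem _ hr)
      by_cases hwv : w = v
      · simp only [hwv, if_true]
        have := ih ((v, n + 1) :: rest) (by
          intro r hr
          rcases List.mem_cons.1 hr with h | h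
          · subst h; simpa using by omega
          · exact hrest r h)
        refine ⟨?_, this.2⟩
        rw [this.1]
        have hexp : pvExpand (((v, n + 1) :: rest).reverse) = pvExpand (((v, n) :: rest).reverse) ++ [v] := by
          simp only [List.reverse_cons, pvExpand_append, List.append_assoc]
          congr 1
          simp only [pvExpand, List.append_nil]
          have : (n + 1).toNat = n.toNat + 1 := by omega
          rw [this, List.replicate_succ' (n := n.toNat)]
        rw [hexp, List.append_assoc]
        simp
      · simp only [hwv, if_false]
        have := ih ((v, 1) :: (w, n) :: rest) (by
          intro r hr
          rcases List.mem_cons.1 hr with h | h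
          · subst h; simp
          · exact hacc r h)
        refine ⟨?_, this.2⟩
        rw [this.1]
        have hexp : pvExpand (((v, 1) :: (w, n) :: rest).reverse)
            = pvExpand (((w, n) :: rest).reverse) ++ [v] := by
          simp only [List.reverse_cons, pvExpand_append]
          simp [pvExpand]
        rw [hexp, List.append_assoc]
        simp

theorem pvRLE_expand (flags : List Int) : pvExpand (pvRLE flags) = flags := by
  have := pvRLE_inv flags [] (by simp)
  simpa [pvRLE, pvExpand] using this.1

theorem pvRLE_pos (flags : List Int) : ∀ r ∈ pvRLE flags, 0 < r.2 := by
  intro r hr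
  exact (pvRLE_inv flags [] (by simp)).2 r (by simpa [pvRLE] using hr)

-- ===== VERDICT (by name: the statement is the Claim_ definition above) =====
theorem find_round_boundaries_spec : Claim_equal_find_round_boundaries := by
  intro frames _
  unfold Spec_find_round_boundaries find_round_boundaries find_round_boundaries_alt
  dsimp only []
  rw [pvA_fold, pvB_fold _ _ _ _ (pvRLE_pos _), pvRLE_expand]
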